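-- pv_equiv track=rewrite | github.com/Poghappy/n8n-automation-workspace | src/knowledge/knowledge_base.py | _analyze_workflow_pattern
-- ===== SOURCE A (Python) =====
-- from typing import Dict, List, Optional, Any, Tuple, Union
--
-- def _analyze_workflow_pattern(node_types: List[str], connections: Dict[str, Any]) -> str:
--     """分析工作流模式"""
--     patterns = []
--
--     # 检查触发器类型
--     triggers = [nt for nt in node_types if 'trigger' in nt.lower()]
--     if triggers:
--         patterns.append(f"触发器模式: {', '.join(triggers)}")
--
--     # 检查数据处理模式
--     if any('http' in nt.lower() for nt in node_types):
--         patterns.append("HTTP请求模式")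
--
--     if any('function' in nt.lower() for nt in node_types):
--         patterns.append("自定义函数处理")
--
--     if any('if' in nt.lower() for nt in node_types):
--         patterns.append("条件分支模式")
--
--     return '; '.join(patterns) if patterns else "基础线性流程"
-- ===== SOURCE B (Python) =====
-- def _analyze_workflow_pattern(node_types, connections):
--     """分析工作流模式 — single pass: lowercase each node type once, collect triggers and flags."""
--     triggers = []
--     has_http = has_function = has_if = False
--     for nt in node_types:
--         low = nt.lower()
--         if 'trigger' in low:
--             triggers.append(nt)
--         if 'http' in low:
--             has_http = True
--         if 'function' in low:
--             has_function = True
--         if 'if' in low: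
--             has_if = True
--     patterns = []
--     if triggers:
--         patterns.append("触发器模式: " + ', '.join(triggers))
--     if has_http:
--         patterns.append("HTTP请求模式")
--     if has_function:
--         patterns.append("自定义函数处理")
--     if has_if:
--         patterns.append("条件分支模式")
--     return '; '.join(patterns) if patterns else "基础线性流程"
-- ===== Notes on version B (the rewrite author's own statement) =====
-- stated objective: faster
-- what changed: Replaces four independent scans over node_types (a trigger filter plus three any-generators, each lowercasing every element again) with one combined loop that lowercases each element once and accumulates the trigger list and three boolean flags.
import Mathlib
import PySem

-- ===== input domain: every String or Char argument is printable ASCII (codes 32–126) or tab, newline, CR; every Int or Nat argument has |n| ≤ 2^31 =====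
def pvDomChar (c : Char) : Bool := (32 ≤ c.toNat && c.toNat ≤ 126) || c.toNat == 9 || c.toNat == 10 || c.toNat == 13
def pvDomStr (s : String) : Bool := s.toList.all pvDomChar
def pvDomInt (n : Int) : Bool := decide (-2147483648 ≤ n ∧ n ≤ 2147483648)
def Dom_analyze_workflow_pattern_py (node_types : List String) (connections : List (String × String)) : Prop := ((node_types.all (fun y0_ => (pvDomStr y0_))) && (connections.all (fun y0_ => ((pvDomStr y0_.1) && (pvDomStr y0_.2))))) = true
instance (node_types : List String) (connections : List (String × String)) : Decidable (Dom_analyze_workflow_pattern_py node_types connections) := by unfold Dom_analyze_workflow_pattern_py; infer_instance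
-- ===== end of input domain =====

-- B replaces A's four independent scans (each lowercasing every element) by one combined
-- pass that lowercases each element once and accumulates the trigger list and three flags.

-- ===== PORT A =====
def analyze_workflow_pattern_py (node_types : List String) (connections : List (String × String)) : String :=
  let patterns : List String := []
  let triggers := node_types.filter (fun nt => PySem.Str.isIn "trigger" (PySem.Str.lower nt))
  let patterns := if triggers ≠ [] then patterns ++ ["触发器模式: " ++ PySem.Str.join ", " triggers] else patterns
  let patterns := if node_types.any (fun nt => PySem.Str.isIn "http" (PySem.Str.lower nt)) then patterns ++ ["HTTP请求模式"] else patterns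
  let patterns := if node_types.any (fun nt => PySem.Str.isIn "function" (PySem.Str.lower nt)) then patterns ++ ["自定义函数处理"] else patterns
  let patterns := if node_types.any (fun nt => PySem.Str.isIn "if" (PySem.Str.lower nt)) then patterns ++ ["条件分支模式"] else patterns
  if patterns ≠ [] then PySem.Str.join "; " patterns else "基础线性流程"

-- ===== PORT B =====
def analyze_workflow_pattern_py_alt (node_types : List String) (connections : List (String × String)) : String :=
  let st := node_types.foldl
    (fun (st : List String × Bool × Bool × Bool) nt =>
      let low := PySem.Str.lower nt
      let t := if PySem.Str.isIn "trigger" low then st.1 ++ [nt] else st.1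
      let h := if PySem.Str.isIn "http" low then true else st.2.1
      let f := if PySem.Str.isIn "function" low then true else st.2.2.1
      let i := if PySem.Str.isIn "if" low then true else st.2.2.2
      (t, h, f, i))
    ([], false, false, false)
  let patterns : List String := []
  let patterns := if st.1 ≠ [] then patterns ++ ["触发器模式: " ++ PySem.Str.join ", " st.1] else patterns
  let patterns := if st.2.1 then patterns ++ ["HTTP请求模式"] else patterns
  let patterns := if st.2.2.1 then patterns ++ ["自定义函数处理"] else patterns
  let patterns := if st.2.2.2 then patterns ++ ["条件分支模式"] else patterns
  if patterns ≠ [] then PySem.Str.join "; " patterns else "基础线性流程"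

-- ===== PRECONDITION & SPEC =====
def Spec_analyze_workflow_pattern_py (node_types : List String) (connections : List (String × String)) (out : String) : Prop := out = analyze_workflow_pattern_py_alt node_types connections
instance (node_types : List String) (connections : List (String × String)) (out : String) : Decidable (Spec_analyze_workflow_pattern_py node_types connections out) := by unfold Spec_analyze_workflow_pattern_py; infer_instance

-- ===== CLAIM (what is proved, stated in full; the proofs are below) =====
def Claim_equal_analyze_workflow_pattern_py : Prop := ∀ (node_types : List String) (connections : List (String × String)), Dom_analyze_workflow_pattern_py node_types connections → Spec_analyze_workflow_pattern_py node_types connections (analyze_workflow_pattern_py node_types connections)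

-- ===== LEMMAS AND PROOFS =====

-- ===== VERDICT (by name: the statement is the Claim_ definition above) =====
-- The single-pass fold computes exactly (filter, any, any, any) of A's four scans.
theorem alt_fold_eq (l : List String) (t0 : List String) (h0 f0 i0 : Bool) :
    l.foldl
      (fun (st : List String × Bool × Bool × Bool) nt =>
        let low := PySem.Str.lower nt
        let t := if PySem.Str.isIn "trigger" low then st.1 ++ [nt] else st.1
        let h := if PySem.Str.isIn "http" low then true else st.2.1
        let f := if PySem.Str.isIn "function" low then true else st.2.2.1
        let i := if PySem.Str.isIn "if" low then true else st.2.2.2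
        (t, h, f, i))
      (t0, h0, f0, i0)
    = (t0 ++ l.filter (fun nt => PySem.Str.isIn "trigger" (PySem.Str.lower nt)),
       h0 || l.any (fun nt => PySem.Str.isIn "http" (PySem.Str.lower nt)),
       f0 || l.any (fun nt => PySem.Str.isIn "function" (PySem.Str.lower nt)),
       i0 || l.any (fun nt => PySem.Str.isIn "if" (PySem.Str.lower nt))) := by
  induction l generalizing t0 h0 f0 i0 with
  | nil => simp
  | cons x xs ih =>
    simp only [List.foldl_cons, List.filter_cons, List.any_cons, ih]
    split_ifs <;> simp_all

theorem analyze_workflow_pattern_py_spec : Claim_equal_analyze_workflow_pattern_py := by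
  intro node_types connections _
  unfold Spec_analyze_workflow_pattern_py analyze_workflow_pattern_py analyze_workflow_pattern_py_alt
  rw [alt_fold_eq]
  simp
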